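-- pv_equiv track=rewrite | github.com/kw123/pibeacon | piBeacon.indigoPlugin/Contents/Server Plugin/pi/sgp40.py | _fix16_div
-- ===== SOURCE A (Python) =====
-- FIX16_MINIMUM                                            = 0x80000000
--
-- FIX16_OVERFLOW                                           = 0x80000000
--
-- def _fix16_div(a, b):
-- 	a=int(a)
-- 	b=int(b)
-- 	if b==0 :
-- 		return FIX16_MINIMUM
-- 	if a>=0:
-- 		remainder = a
-- 	else:
-- 		remainder = (a*(-1))&0xFFFFFFFF
-- 	if b >= 0:
-- 		divider = b
-- 	else:
-- 		divider = (b*(-1))&0xFFFFFFFF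
-- 	quotient = 0
-- 	bit =0x10000
-- 	while (divider < remainder):
-- 		divider = divider<<1
-- 		bit <<= 1
-- 	if not bit:
-- 		return FIX16_OVERFLOW
-- 	if (divider & 0x80000000):
-- 		if (remainder >= divider):
-- 			quotient |= bit
-- 			remainder -= divider
-- 		divider >>= 1
-- 		bit >>= 1
-- 	while bit and remainder:
-- 		if (remainder >= divider):
-- 			quotient |= bit
-- 			remainder -= divider
-- 		remainder <<= 1
-- 		bit >>= 1
-- 	if (remainder >= divider):
-- 		quotient+=1
-- 	result = quotient
-- 	if ((a ^ b) & 0x80000000):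
-- 		if (result == FIX16_MINIMUM):
-- 			return FIX16_OVERFLOW
-- 		result = -result
-- 	return result
-- ===== SOURCE B (Python) =====
-- FIX16_MINIMUM                                            = 0x80000000
--
-- FIX16_OVERFLOW                                           = 0x80000000
--
-- def _fix16_div(a, b):
-- 	a = int(a)
-- 	b = int(b)
-- 	if b == 0:
-- 		return FIX16_MINIMUM
-- 	R = a if a >= 0 else (-a) & 0xFFFFFFFF
-- 	D = b if b >= 0 else (-b) & 0xFFFFFFFF
-- 	# round-half-up division of R*2^16 by D, in one closed-form floor division
-- 	q = (R * 131072 + D) // (2 * D)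
-- 	if (a ^ b) & 0x80000000:
-- 		if q == FIX16_MINIMUM:
-- 			return FIX16_OVERFLOW
-- 		return -q
-- 	return q
-- ===== Notes on version B (the rewrite author's own statement) =====
-- stated objective: simpler
-- what changed: Replaces the ~48-iteration bitwise shift/subtract long-division loop (and its dead bit==0 overflow check) with one closed-form floor division computing the same round-half-up quotient (R*131072 + D)//(2*D), keeping A's asymmetric masking and sign tail.
import Mathlib
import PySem

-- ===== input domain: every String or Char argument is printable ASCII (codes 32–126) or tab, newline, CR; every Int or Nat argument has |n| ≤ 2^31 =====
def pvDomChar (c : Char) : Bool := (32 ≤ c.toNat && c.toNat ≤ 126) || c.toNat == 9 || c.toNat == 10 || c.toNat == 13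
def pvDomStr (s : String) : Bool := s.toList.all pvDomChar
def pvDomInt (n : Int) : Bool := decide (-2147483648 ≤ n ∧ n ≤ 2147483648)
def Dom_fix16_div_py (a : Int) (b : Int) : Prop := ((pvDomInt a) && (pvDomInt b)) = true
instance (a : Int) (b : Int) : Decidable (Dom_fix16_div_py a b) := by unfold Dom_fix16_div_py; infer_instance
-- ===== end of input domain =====

-- B replaces A's bitwise shift/subtract long-division loop by one closed-form round-half-up
-- floor division (same exact result; the loop and its dead overflow check disappear).

-- ===== PORT A =====
def FIX16_MINIMUM : Int := 0x80000000
def FIX16_OVERFLOW : Int := 0x80000000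

-- `while (divider < remainder): divider <<= 1; bit <<= 1` — the `0 < divider` conjunct is a
-- totality guard only (Python diverges there; never reached on Dom: divider ≥ 1).
def fix16Loop1 (divider remainder bit : Int) : Int × Int :=
  if _h : divider < remainder ∧ 0 < divider then
    fix16Loop1 (divider <<< (1 : Nat)) remainder (bit <<< (1 : Nat))
  else (divider, bit)
termination_by (remainder - divider).toNat
decreasing_by simp only [Int.shiftLeft_eq]; omega

-- `while bit and remainder: …` — `0 < bit` instead of `bit != 0` is a totality guard only
-- (Python diverges for negative `bit`; `bit` is always ≥ 0 here).
def fix16Loop2 (quotient remainder divider bit : Int) : Int × Int :=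
  if _h : 0 < bit ∧ remainder ≠ 0 then
    if remainder ≥ divider then
      fix16Loop2 (PySem.Int.bor quotient bit) ((remainder - divider) <<< (1 : Nat)) divider (bit >>> (1 : Nat))
    else
      fix16Loop2 quotient (remainder <<< (1 : Nat)) divider (bit >>> (1 : Nat))
  else (quotient, remainder)
termination_by bit.toNat
decreasing_by all_goals (rw [Int.shiftRight_eq_div_pow]; omega)

def fix16_div_py (a : Int) (b : Int) : Int :=
  if b = 0 then FIX16_MINIMUM
  else
    let remainder := if a ≥ 0 then a else PySem.Int.band (a * (-1)) 0xFFFFFFFF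
    let divider := if b ≥ 0 then b else PySem.Int.band (b * (-1)) 0xFFFFFFFF
    let p1 := fix16Loop1 divider remainder 0x10000
    let divider := p1.1
    let bit := p1.2
    if bit = 0 then FIX16_OVERFLOW
    else
      let st :=
        if PySem.Int.band divider 0x80000000 ≠ 0 then
          (if remainder ≥ divider then (PySem.Int.bor 0 bit, remainder - divider)
           else ((0 : Int), remainder), divider >>> (1 : Nat), bit >>> (1 : Nat))
        else (((0 : Int), remainder), divider, bit)
      let quotient := st.1.1
      let remainder := st.1.2
      let divider := st.2.1
      let bit := st.2.2
      let p2 := fix16Loop2 quotient remainder divider bit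
      let quotient := p2.1
      let remainder := p2.2
      let quotient := if remainder ≥ divider then quotient + 1 else quotient
      let result := quotient
      if PySem.Int.band (PySem.Int.bxor a b) 0x80000000 ≠ 0 then
        (if result = FIX16_MINIMUM then FIX16_OVERFLOW else -result)
      else result

-- ===== PORT B =====
def fix16_div_py_alt (a : Int) (b : Int) : Int :=
  if b = 0 then 0x80000000
  else
    let R := if a ≥ 0 then a else PySem.Int.band (-a) 0xFFFFFFFF
    let D := if b ≥ 0 then b else PySem.Int.band (-b) 0xFFFFFFFF
    let q := PySem.Int.floordiv (R * 131072 + D) (2 * D)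
    if PySem.Int.band (PySem.Int.bxor a b) 0x80000000 ≠ 0 then
      (if q = 0x80000000 then (0x80000000 : Int) else -q)
    else q

-- ===== PRECONDITION & SPEC =====
def Spec_fix16_div_py (a : Int) (b : Int) (out : Int) : Prop := out = fix16_div_py_alt a b
instance (a : Int) (b : Int) (out : Int) : Decidable (Spec_fix16_div_py a b out) := by unfold Spec_fix16_div_py; infer_instance

-- ===== CLAIM (what is proved, stated in full; the proofs are below) =====
def Claim_equal_fix16_div_py : Prop := ∀ (a : Int) (b : Int), Dom_fix16_div_py a b → Spec_fix16_div_py a b (fix16_div_py a b)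

-- ===== LEMMAS AND PROOFS =====

-- masking a value already in [0, 2^32) is the identity
lemma band_mask_id (x : Int) (h0 : 0 ≤ x) (h1 : x < 4294967296) :
    PySem.Int.band x 0xFFFFFFFF = x := by
  rw [PySem.Int.band_of_nonneg h0 (by norm_num)]
  have hx : x.toNat < 2 ^ 32 := by omega
  have : (0xFFFFFFFF : Int).toNat = 2 ^ 32 - 1 := by decide
  rw [this, Nat.and_two_pow_sub_one_eq_mod, Nat.mod_eq_of_lt hx]
  omega

-- a nonnegative value with bit 31 set is at least 2^31
lemma band_bit31_ge (x : Int) (h0 : 0 ≤ x) (h : PySem.Int.band x 0x80000000 ≠ 0) :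
    2147483648 ≤ x := by
  by_contra hlt
  apply h
  rw [PySem.Int.band_of_nonneg h0 (by norm_num)]
  have hx : x.toNat < 2 ^ 31 := by omega
  have h80 : (0x80000000 : Int).toNat = 2 ^ 31 := by decide
  rw [h80, Nat.and_two_pow, Nat.testBit_lt_two_pow hx]
  simp

-- `quotient |= bit` is addition: all set bits of quotient are above bit
lemma bor_pow_eq_add (q : Int) (j : Nat) (hq : 0 ≤ q) (hd : (2 : Int) ^ (j + 1) ∣ q) :
    PySem.Int.bor q ((2 : Int) ^ j) = q + (2 : Int) ^ j := by
  obtain ⟨c, hc⟩ := hd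
  have hc0 : 0 ≤ c := by nlinarith [pow_pos (by norm_num : (0:Int) < 2) (j+1)]
  have hcn : (c.toNat : Int) = c := Int.toNat_of_nonneg hc0
  have hq' : q = ((2 ^ (j + 1) * c.toNat : Nat) : Int) := by push_cast; rw [hcn]; exact hc
  have hp : ((2 : Int) ^ j) = ((2 ^ j : Nat) : Int) := by push_cast; ring
  rw [hq', hp, PySem.Int.bor_natCast,
    ← Nat.two_pow_add_eq_or_of_lt (Nat.pow_lt_pow_right (by norm_num) (Nat.lt_succ_self j)) c.toNat]
  push_cast [pow_succ]; ring

-- the doubling loop multiplies divider and bit by the same power of two, ending with R ≤ divider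
lemma loop1_spec (V R bit : Int) : 0 < V →
    ∃ k : Nat, fix16Loop1 V R bit = (V * 2 ^ k, bit * 2 ^ k) ∧ R ≤ V * 2 ^ k := by
  fun_induction fix16Loop1 V R bit with
  | case1 V bit h ih =>
    intro hV
    obtain ⟨k, hk, hle⟩ := ih (by rw [Int.shiftLeft_eq]; omega)
    refine ⟨k + 1, ?_, ?_⟩
    · rw [hk]; simp only [Int.shiftLeft_eq, Prod.mk.injEq]; constructor <;> ring
    · simp only [Int.shiftLeft_eq] at hle
      calc R ≤ V * 2 ^ 1 * 2 ^ k := hle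
        _ = V * 2 ^ (k + 1) := by ring
  | case2 V bit h =>
    intro hV
    refine ⟨0, by simp, ?_⟩
    simp only [pow_zero, mul_one]
    omega

-- the subtract/shift loop followed by the final round-up step computes
-- round-half-up of r·2^j / V, i.e. (2·r·2^j + V) // (2V), added to quotient
lemma loop2_zero (q V : Int) (bit : Int) : fix16Loop2 q 0 V bit = (q, 0) := by
  rw [fix16Loop2]; simp

lemma loop2_spec (j : Nat) : ∀ (q r V : Int), 1 ≤ V → 0 ≤ r → r < 2 * V →
    0 ≤ q → (2 : Int) ^ (j + 1) ∣ q →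
    (if (fix16Loop2 q r V ((2 : Int) ^ j)).2 ≥ V then (fix16Loop2 q r V ((2 : Int) ^ j)).1 + 1
     else (fix16Loop2 q r V ((2 : Int) ^ j)).1)
      = q + PySem.Int.floordiv (2 * (r * (2 : Int) ^ j) + V) (2 * V) := by
  induction j with
  | zero =>
    intro q r V hV hr0 hr2 hq0 hdvd
    by_cases hr : r = 0
    · subst hr
      rw [loop2_zero, if_neg (by simp; omega)]
      rw [show PySem.Int.floordiv (2 * (0 * (2:Int) ^ 0) + V) (2 * V) = 0 from
        (PySem.Int.floordiv_eq_iff_of_pos (by omega)).mpr (by constructor <;> nlinarith)]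
      omega
    · rw [fix16Loop2, dif_pos ⟨by positivity, hr⟩]
      by_cases hge : r ≥ V
      · rw [if_pos hge, bor_pow_eq_add q 0 hq0 (by simpa using hdvd),
          show ((2:Int) ^ 0) >>> (1:Nat) = 0 by decide,
          show ((r - V) <<< (1:Nat)) = (r - V) * 2 by rw [Int.shiftLeft_eq]; ring,
          fix16Loop2, dif_neg (by simp)]
        by_cases h2 : (r - V) * 2 ≥ V
        · rw [if_pos h2, show PySem.Int.floordiv (2 * (r * (2:Int) ^ 0) + V) (2 * V) = 2 from
            (PySem.Int.floordiv_eq_iff_of_pos (by omega)).mpr (by constructor <;> nlinarith)]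
          try ring
        · rw [if_neg h2, show PySem.Int.floordiv (2 * (r * (2:Int) ^ 0) + V) (2 * V) = 1 from
            (PySem.Int.floordiv_eq_iff_of_pos (by omega)).mpr (by constructor <;> nlinarith)]
          try ring
      · rw [if_neg hge,
          show ((2:Int) ^ 0) >>> (1:Nat) = 0 by decide,
          show (r <<< (1:Nat)) = r * 2 by rw [Int.shiftLeft_eq]; ring,
          fix16Loop2, dif_neg (by simp)]
        by_cases h2 : r * 2 ≥ V
        · rw [if_pos h2, show PySem.Int.floordiv (2 * (r * (2:Int) ^ 0) + V) (2 * V) = 1 from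
            (PySem.Int.floordiv_eq_iff_of_pos (by omega)).mpr (by constructor <;> nlinarith)]
          try ring
        · rw [if_neg h2, show PySem.Int.floordiv (2 * (r * (2:Int) ^ 0) + V) (2 * V) = 0 from
            (PySem.Int.floordiv_eq_iff_of_pos (by omega)).mpr (by constructor <;> nlinarith)]
          try ring
  | succ j ih =>
    intro q r V hV hr0 hr2 hq0 hdvd
    have hpow : (0:Int) < 2 ^ (j+1) := by positivity
    by_cases hr : r = 0
    · subst hr
      rw [loop2_zero, if_neg (by simp; omega)]
      rw [show PySem.Int.floordiv (2 * (0 * (2:Int) ^ (j+1)) + V) (2 * V) = 0 from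
        (PySem.Int.floordiv_eq_iff_of_pos (by omega)).mpr (by constructor <;> nlinarith)]
      omega
    · have hshift : ((2:Int) ^ (j+1)) >>> (1:Nat) = 2 ^ j := by
        rw [Int.shiftRight_eq_div_pow, pow_succ]
        omega
      rw [fix16Loop2, dif_pos ⟨hpow, hr⟩]
      by_cases hge : r ≥ V
      · rw [if_pos hge, bor_pow_eq_add q (j+1) hq0 hdvd, hshift,
          show ((r - V) <<< (1:Nat)) = (r - V) * 2 by rw [Int.shiftLeft_eq]; ring]
        rw [ih (q + 2^(j+1)) ((r - V) * 2) V hV (by omega) (by omega) (by positivity)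
          (by exact dvd_add (dvd_trans ⟨2, by ring⟩ hdvd) dvd_rfl)]
        have : 2 * (r * (2:Int) ^ (j+1)) + V = (2 * ((r - V) * 2 * 2 ^ j) + V) + 2 ^ (j+1) * (2 * V) := by
          rw [pow_succ]; ring
        rw [this, PySem.Int.floordiv_eq_ediv_of_pos (by omega), PySem.Int.floordiv_eq_ediv_of_pos (by omega),
          Int.add_mul_ediv_right _ _ (by omega : (2*V) ≠ 0)]
        ring
      · rw [if_neg hge, hshift,
          show (r <<< (1:Nat)) = r * 2 by rw [Int.shiftLeft_eq]; ring]
        rw [ih q (r * 2) V hV (by omega) (by omega) hq0 (dvd_trans (pow_dvd_pow 2 (by omega)) hdvd)]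
        rw [show 2 * (r * 2 * (2:Int) ^ j) = 2 * (r * 2 ^ (j+1)) by rw [pow_succ]; ring]

-- helper: the closed form agrees after dropping a common power-of-two factor
lemma floordiv_cancel_pow (R D : Int) (k : Nat) (hD : 0 < D) :
    PySem.Int.floordiv (2 ^ k * (R * 131072 + D)) (2 ^ k * (2 * D))
      = PySem.Int.floordiv (R * 131072 + D) (2 * D) := by
  rw [PySem.Int.floordiv_eq_ediv_of_pos (by positivity),
    PySem.Int.floordiv_eq_ediv_of_pos (by omega),
    Int.mul_ediv_mul_of_pos _ _ (by positivity : (0:Int) < 2 ^ k)]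

theorem fix16_div_main : ∀ (a b : Int), Dom_fix16_div_py a b → fix16_div_py a b = fix16_div_py_alt a b := by
  intro a b hD
  have hDom : -2147483648 ≤ a ∧ a ≤ 2147483648 ∧ -2147483648 ≤ b ∧ b ≤ 2147483648 := by
    simp only [Dom_fix16_div_py, pvDomInt, Bool.and_eq_true, decide_eq_true_eq] at hD
    omega
  by_cases hb : b = 0
  · simp [fix16_div_py, fix16_div_py_alt, hb, FIX16_MINIMUM]
  · unfold fix16_div_py fix16_div_py_alt
    rw [if_neg hb, if_neg hb]
    simp only [mul_neg_one, FIX16_MINIMUM, FIX16_OVERFLOW]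
    have hR : (if a ≥ 0 then a else PySem.Int.band (-a) 0xFFFFFFFF) = if a ≥ 0 then a else -a := by
      by_cases ha : a ≥ 0
      · simp [ha]
      · simp only [ha, if_false]
        exact band_mask_id (-a) (by omega) (by omega)
    have hDv : (if b ≥ 0 then b else PySem.Int.band (-b) 0xFFFFFFFF) = if b ≥ 0 then b else -b := by
      by_cases hbp : b ≥ 0
      · simp [hbp]
      · simp only [hbp, if_false]
        exact band_mask_id (-b) (by omega) (by omega)
    rw [hR, hDv]
    set Rv : Int := if a ≥ 0 then a else -a with hRvdef
    set Dv : Int := if b ≥ 0 then b else -b with hDvdef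
    have hR0 : 0 ≤ Rv := by rw [hRvdef]; split <;> omega
    have hR1 : Rv ≤ 2147483648 := by rw [hRvdef]; split <;> omega
    have hD1 : 1 ≤ Dv := by rw [hDvdef]; split <;> omega
    have hD2 : Dv ≤ 2147483648 := by rw [hDvdef]; split <;> omega
    obtain ⟨k, hk, hle⟩ := loop1_spec Dv Rv 0x10000 (by omega)
    rw [hk]
    dsimp only
    have h2k : (0:Int) < 2 ^ k := by positivity
    rw [if_neg (by positivity : ¬((65536:Int) * 2 ^ k = 0))]
    have hBpow : (65536:Int) * 2 ^ k = 2 ^ (16 + k) := by rw [pow_add]; norm_num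
    rw [hBpow]
    have hV1 : 1 ≤ Dv * 2 ^ k := by nlinarith
    have hkey : (16 + k) = (15 + k) + 1 := by omega
    by_cases hC : PySem.Int.band (Dv * 2 ^ k) 2147483648 ≠ 0
    · rw [if_pos hC]
      dsimp only
      have hV31 : 2147483648 ≤ Dv * 2 ^ k := band_bit31_ge _ (by nlinarith) hC
      have hW : (2:Int) ∣ Dv * 2 ^ k := by
        cases k with
        | zero => simp only [pow_zero, mul_one]; exact ⟨1073741824, by omega⟩
        | succ j => exact Dvd.dvd.mul_left (dvd_pow_self 2 (Nat.succ_ne_zero j)) Dv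
      obtain ⟨W, hWeq⟩ := hW
      have hW1 : 1 ≤ W := by omega
      have hsh1 : (Dv * 2 ^ k) >>> (1:Nat) = W := by
        rw [Int.shiftRight_eq_div_pow, hWeq]; omega
      have hsh2 : ((2:Int) ^ (16 + k)) >>> (1:Nat) = 2 ^ (15 + k) := by
        rw [Int.shiftRight_eq_div_pow, hkey, pow_succ]; omega
      rw [hsh1, hsh2]
      by_cases hge : Rv ≥ Dv * 2 ^ k
      · rw [if_pos hge]
        dsimp only
        rw [PySem.Int.bor_comm, PySem.Int.bor_zero,
          show Rv - Dv * 2 ^ k = 0 from by omega]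
        have hl2 := loop2_spec (15 + k) (2 ^ (16 + k)) 0 W hW1 le_rfl (by omega)
          (by positivity) (by rw [← hkey])
        rw [hl2]
        rw [show PySem.Int.floordiv (2 * ((0:Int) * 2 ^ (15 + k)) + W) (2 * W) = 0 from
          (PySem.Int.floordiv_eq_iff_of_pos (by omega)).mpr (by constructor <;> nlinarith)]
        rw [show PySem.Int.floordiv (Rv * 131072 + Dv) (2 * Dv) = 2 ^ (16 + k) from by
          have hRvV : Rv = Dv * 2 ^ k := by omega
          rw [PySem.Int.floordiv_eq_ediv_of_pos (by omega), hRvV,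
            show Dv * 2 ^ k * 131072 + Dv = Dv * (2 ^ (17 + k) + 1) from by
              rw [show (17 + k) = k + 17 from by omega, pow_add]; ring,
            show 2 * Dv = Dv * 2 from by ring,
            Int.mul_ediv_mul_of_pos _ _ (by omega : (0:Int) < Dv)]
          have h17 : (2:Int) ^ (17 + k) = 2 * 2 ^ (16 + k) := by
            rw [show (17 + k) = (16 + k) + 1 from by omega, pow_succ]; ring
          omega]
        rw [add_zero]
      · rw [if_neg hge]
        dsimp only
        have hl2 := loop2_spec (15 + k) 0 Rv W hW1 hR0 (by omega) le_rfl (dvd_zero _)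
        rw [hl2, zero_add]
        rw [← floordiv_cancel_pow Rv Dv k (by omega),
          show (2:Int) ^ k * (Rv * 131072 + Dv) = 2 * (2 * (Rv * (2:Int) ^ (15 + k)) + W) from by
            rw [show (15 + k) = k + 15 from by omega, pow_add]; linear_combination hWeq,
          show (2:Int) ^ k * (2 * Dv) = 2 * (2 * W) from by linear_combination 2 * hWeq,
          PySem.Int.floordiv_eq_ediv_of_pos (by omega : (0:Int) < 2 * W),
          PySem.Int.floordiv_eq_ediv_of_pos (by omega : (0:Int) < 2 * (2 * W)),
          Int.mul_ediv_mul_of_pos _ _ (by omega : (0:Int) < 2)]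
    · rw [if_neg hC]
      dsimp only
      have hl2 := loop2_spec (16 + k) 0 Rv (Dv * 2 ^ k) hV1 hR0 (by omega) le_rfl (dvd_zero _)
      rw [hl2, zero_add]
      rw [show 2 * (Rv * (2:Int) ^ (16 + k)) + Dv * 2 ^ k = 2 ^ k * (Rv * 131072 + Dv) from by
          rw [show (16 + k) = k + 16 from by omega, pow_add]; ring,
        show 2 * (Dv * (2:Int) ^ k) = 2 ^ k * (2 * Dv) from by ring,
        floordiv_cancel_pow Rv Dv k (by omega)]

-- ===== VERDICT (by name: the statement is the Claim_ definition above) =====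
theorem fix16_div_py_spec : Claim_equal_fix16_div_py := by
  intro a b hD
  exact fix16_div_main a b hD
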